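-- pv_equiv track=rewrite | github.com/yun-dam/urban-building-energy-modeling-on-GIS | util.py | gen_RoofName
-- ===== SOURCE A (Python) =====
-- def gen_RoofName(roofs, n_floor):
--     n_eachroof = len(roofs)//n_floor # number of roofs per each floor
--
--     RoofBoundCond = ['Surface']*( (n_floor-1) * n_eachroof) + ['Outdoors']*n_eachroof
--     RoofSunExposure = ['NoSun']* ( (n_floor-1) * n_eachroof) + ['SunExposed']*n_eachroof
--     RoofWindExposure = ['NoWind']*( (n_floor-1) * n_eachroof) + ['WindExposed']*n_eachroof
--
--     RoofZoneName, RoofName, RoofBoundCondObj = [], [], []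
--
--     for idx in range(n_floor):
--
--         RoofBoundCondObj += ['floor_{}_{}'.format(idx2+1, idx+2) for idx2 in range(n_eachroof)] # adjacent floor of each floor
--         RoofName += ['roof_{}_{}'.format(idx2+1, idx+1) for idx2 in range(n_eachroof)]
--         RoofZoneName += ['zone_{}'.format(idx+1)]*n_eachroof # zone name w.r.t each roof
--
--     RoofBoundCondObj[-n_eachroof:] = ['']*n_eachroof
--
--     return RoofName, RoofZoneName, RoofBoundCond, RoofBoundCondObj, RoofSunExposure, RoofWindExposure
-- ===== SOURCE B (Python) =====
-- def gen_RoofName(roofs, n_floor):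
--     n_eachroof = len(roofs) // n_floor
--     RoofName, RoofZoneName, RoofBoundCond = [], [], []
--     RoofBoundCondObj, RoofSunExposure, RoofWindExposure = [], [], []
--     for idx in range(n_floor):
--         top = (idx == n_floor - 1)
--         for idx2 in range(n_eachroof):
--             RoofName.append('roof_{}_{}'.format(idx2 + 1, idx + 1))
--             RoofZoneName.append('zone_{}'.format(idx + 1))
--             if top:
--                 RoofBoundCond.append('Outdoors')
--                 RoofBoundCondObj.append('')
--                 RoofSunExposure.append('SunExposed')
--                 RoofWindExposure.append('WindExposed')
--             else:
--                 RoofBoundCond.append('Surface')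
--                 RoofBoundCondObj.append('floor_{}_{}'.format(idx2 + 1, idx + 2))
--                 RoofSunExposure.append('NoSun')
--                 RoofWindExposure.append('NoWind')
--     return RoofName, RoofZoneName, RoofBoundCond, RoofBoundCondObj, RoofSunExposure, RoofWindExposure
-- ===== Notes on version B (the rewrite author's own statement) =====
-- stated objective: simpler
-- what changed: B builds all six lists in one loop over floors with a top-floor branch, eliminating A's three repetition-concatenation lists and the post-hoc negative-slice overwrite of RoofBoundCondObj.
import Mathlib
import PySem

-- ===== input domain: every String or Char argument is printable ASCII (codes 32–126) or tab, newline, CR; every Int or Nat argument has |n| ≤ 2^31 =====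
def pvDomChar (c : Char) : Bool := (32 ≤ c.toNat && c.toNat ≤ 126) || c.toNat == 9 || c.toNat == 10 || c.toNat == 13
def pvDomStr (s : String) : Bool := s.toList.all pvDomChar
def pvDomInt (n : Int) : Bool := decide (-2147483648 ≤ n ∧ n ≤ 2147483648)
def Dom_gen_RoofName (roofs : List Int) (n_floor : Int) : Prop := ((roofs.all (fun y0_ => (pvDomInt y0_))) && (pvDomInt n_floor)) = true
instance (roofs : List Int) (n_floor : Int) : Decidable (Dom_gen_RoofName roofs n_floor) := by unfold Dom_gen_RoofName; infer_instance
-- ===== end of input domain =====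

-- B builds all six lists in one loop over the floors with a top-floor branch, instead of A's
-- three repetition-concatenation lists plus a post-hoc slice overwrite (objective: simpler).

-- ===== PORT A =====
def gen_RoofName (roofs : List Int) (n_floor : Int) : List String × List String × List String × List String × List String × List String :=
  let n_eachroof : Int := PySem.Int.floordiv (roofs.length : Int) n_floor
  -- ['x']*k for a possibly negative Int k is [] — Int.toNat clamps, which is exact here
  let roofBoundCond := List.replicate ((n_floor - 1) * n_eachroof).toNat "Surface" ++ List.replicate n_eachroof.toNat "Outdoors"
  let roofSunExposure := List.replicate ((n_floor - 1) * n_eachroof).toNat "NoSun" ++ List.replicate n_eachroof.toNat "SunExposed"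
  let roofWindExposure := List.replicate ((n_floor - 1) * n_eachroof).toNat "NoWind" ++ List.replicate n_eachroof.toNat "WindExposed"
  -- the loop; state is (RoofBoundCondObj, RoofName, RoofZoneName)
  let st := (PySem.List.pyRange 0 n_floor).foldl
    (fun (st : List String × List String × List String) idx =>
      (st.1 ++ (PySem.List.pyRange 0 n_eachroof).map
          (fun idx2 => "floor_" ++ PySem.Int.toStr (idx2 + 1) ++ "_" ++ PySem.Int.toStr (idx + 2)),
       st.2.1 ++ (PySem.List.pyRange 0 n_eachroof).map
          (fun idx2 => "roof_" ++ PySem.Int.toStr (idx2 + 1) ++ "_" ++ PySem.Int.toStr (idx + 1)),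
       st.2.2 ++ List.replicate n_eachroof.toNat ("zone_" ++ PySem.Int.toStr (idx + 1))))
    ([], [], [])
  -- RoofBoundCondObj[-n_eachroof:] = ['']*n_eachroof; exact on Pre_ (the list's length is a
  -- multiple of n_eachroof ≥ 0, so the slice start len-k never clamps and k = 0 replaces nothing)
  let roofBoundCondObj := st.1.take (st.1.length - n_eachroof.toNat) ++ List.replicate n_eachroof.toNat ""
  (st.2.1, st.2.2, roofBoundCond, roofBoundCondObj, roofSunExposure, roofWindExposure)

-- ===== PORT B =====
def gen_RoofName_alt (roofs : List Int) (n_floor : Int) : List String × List String × List String × List String × List String × List String :=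
  let n_eachroof : Int := PySem.Int.floordiv (roofs.length : Int) n_floor
  (PySem.List.pyRange 0 n_floor).foldl
    (fun (st : List String × List String × List String × List String × List String × List String) idx =>
      let top := idx == n_floor - 1
      (PySem.List.pyRange 0 n_eachroof).foldl
        (fun st2 idx2 =>
          (st2.1 ++ ["roof_" ++ PySem.Int.toStr (idx2 + 1) ++ "_" ++ PySem.Int.toStr (idx + 1)],
           st2.2.1 ++ ["zone_" ++ PySem.Int.toStr (idx + 1)],
           st2.2.2.1 ++ [if top then "Outdoors" else "Surface"],
           st2.2.2.2.1 ++ [if top then "" else "floor_" ++ PySem.Int.toStr (idx2 + 1) ++ "_" ++ PySem.Int.toStr (idx + 2)],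
           st2.2.2.2.2.1 ++ [if top then "SunExposed" else "NoSun"],
           st2.2.2.2.2.2 ++ [if top then "WindExposed" else "NoWind"]))
        st)
    ([], [], [], [], [], [])

-- ===== PRECONDITION & SPEC =====
-- Pre_ excludes n_floor ≤ 0: n_floor = 0 raises ZeroDivisionError, and a nonpositive floor
-- count is outside the function's natural domain (for negative n_floor A returns accidental
-- nonempty repetition lists produced by negative floor division, while B returns empty lists).
def Pre_gen_RoofName (roofs : List Int) (n_floor : Int) : Prop := 1 ≤ n_floor
instance (roofs : List Int) (n_floor : Int) : Decidable (Pre_gen_RoofName roofs n_floor) := by unfold Pre_gen_RoofName; infer_instance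
def pvWitness_gen_RoofName : List Int × Int := ([1, 2, 3, 4], 2)

def Spec_gen_RoofName (roofs : List Int) (n_floor : Int) (out : List String × List String × List String × List String × List String × List String) : Prop := out = gen_RoofName_alt roofs n_floor
instance (roofs : List Int) (n_floor : Int) (out : List String × List String × List String × List String × List String × List String) : Decidable (Spec_gen_RoofName roofs n_floor out) := by unfold Spec_gen_RoofName; infer_instance

-- ===== CLAIM (what is proved, stated in full; the proofs are below) =====
def Claim_equal_gen_RoofName : Prop := ∀ (roofs : List Int) (n_floor : Int), Dom_gen_RoofName roofs n_floor → Pre_gen_RoofName roofs n_floor → Spec_gen_RoofName roofs n_floor (gen_RoofName roofs n_floor)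

-- ===== LEMMAS AND PROOFS =====

theorem pvFold3 {α : Type} (g1 g2 g3 : α → List String) (l : List α) (st : List String × List String × List String) :
    l.foldl (fun st i => (st.1 ++ g1 i, st.2.1 ++ g2 i, st.2.2 ++ g3 i)) st
      = (st.1 ++ l.flatMap g1, st.2.1 ++ l.flatMap g2, st.2.2 ++ l.flatMap g3) := by
  induction l generalizing st with
  | nil => simp
  | cons a t ih => simp [ih]

theorem pvFold6 {α : Type} (f1 f2 f3 f4 f5 f6 : α → String) (l : List α)
    (st : List String × List String × List String × List String × List String × List String) :
    l.foldl (fun st i => (st.1 ++ [f1 i], st.2.1 ++ [f2 i], st.2.2.1 ++ [f3 i],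
        st.2.2.2.1 ++ [f4 i], st.2.2.2.2.1 ++ [f5 i], st.2.2.2.2.2 ++ [f6 i])) st
      = (st.1 ++ l.map f1, st.2.1 ++ l.map f2, st.2.2.1 ++ l.map f3,
         st.2.2.2.1 ++ l.map f4, st.2.2.2.2.1 ++ l.map f5, st.2.2.2.2.2 ++ l.map f6) := by
  induction l generalizing st with
  | nil => simp
  | cons a t ih => simp [ih]

theorem pvFold6App {α : Type} (g1 g2 g3 g4 g5 g6 : α → List String) (l : List α)
    (st : List String × List String × List String × List String × List String × List String) :
    l.foldl (fun st i => (st.1 ++ g1 i, st.2.1 ++ g2 i, st.2.2.1 ++ g3 i,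
        st.2.2.2.1 ++ g4 i, st.2.2.2.2.1 ++ g5 i, st.2.2.2.2.2 ++ g6 i)) st
      = (st.1 ++ l.flatMap g1, st.2.1 ++ l.flatMap g2, st.2.2.1 ++ l.flatMap g3,
         st.2.2.2.1 ++ l.flatMap g4, st.2.2.2.2.1 ++ l.flatMap g5, st.2.2.2.2.2 ++ l.flatMap g6) := by
  induction l generalizing st with
  | nil => simp
  | cons a t ih => simp [ih]

theorem pvSplit {α : Type} (t : Nat) (F G : Nat → List α) (E : List α)
    (hF : ∀ i, i < t → F i = G i) (hE : F t = E) :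
    (List.range (t + 1)).flatMap F = (List.range t).flatMap G ++ E := by
  rw [List.range_succ, List.flatMap_append]
  congr 1
  · exact List.flatMap_congr (fun i hi => hF i (List.mem_range.mp hi))
  · simp [hE]

theorem pvFlatRep {α : Type} (t m : Nat) (x : α) :
    (List.range t).flatMap (fun _ => List.replicate m x) = List.replicate (t * m) x := by
  induction t with
  | zero => simp
  | succ t ih => simp [List.range_succ, ih, Nat.succ_mul]

theorem pvLenFlat {α : Type} (t m : Nat) (F : Nat → List α) (h : ∀ i, (F i).length = m) :
    ((List.range t).flatMap F).length = t * m := by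
  induction t with
  | zero => simp
  | succ t ih => simp [List.range_succ, ih, h, Nat.succ_mul]

theorem gen_RoofName_eq (roofs : List Int) (n_floor : Int) (h : 1 ≤ n_floor) :
    gen_RoofName roofs n_floor = gen_RoofName_alt roofs n_floor := by
  obtain ⟨n, rfl⟩ : ∃ n : Nat, n_floor = (n : Int) := ⟨n_floor.toNat, (Int.toNat_of_nonneg (by omega)).symm⟩
  obtain ⟨t, rfl⟩ : ∃ t : Nat, n = t + 1 := ⟨n - 1, by omega⟩
  unfold gen_RoofName gen_RoofName_alt
  simp only []
  rw [show PySem.Int.floordiv (roofs.length : Int) ((t + 1 : Nat) : Int)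
        = ((roofs.length / (t + 1) : Nat) : Int) from PySem.Int.floordiv_natCast _ _]
  set m : Nat := roofs.length / (t + 1) with hmdef
  rw [PySem.List.pyRange_zero_natCast, PySem.List.pyRange_zero_natCast]
  simp only [List.foldl_map, List.map_map, pvFold3, pvFold6, pvFold6App,
    Function.comp_def, Int.toNat_natCast, List.nil_append, List.map_const', List.length_range]
  have hbeq : ∀ i : Nat, i < t → (((i : Nat) : Int) == (((t + 1 : Nat) : Nat) : Int) - 1) = false := by
    intro i hi; simp; omega
  have hbt : ((((t : Nat) : Nat) : Int) == (((t + 1 : Nat) : Nat) : Int) - 1) = true := by simp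
  have hcast : (((((t + 1 : Nat) : Nat) : Int) - 1) * ((m : Nat) : Int)).toNat = t * m := by
    have : ((((t + 1 : Nat) : Nat) : Int) - 1) * ((m : Nat) : Int) = ((t * m : Nat) : Int) := by push_cast; ring
    rw [this, Int.toNat_natCast]
  rw [hcast]
  have hblk : ∀ x y : String,
      List.replicate (t * m) x ++ List.replicate m y
        = (List.range (t + 1)).flatMap
            (fun i => List.replicate m (if (((i : Nat) : Int) == (((t + 1 : Nat) : Nat) : Int) - 1) then y else x)) := by
    intro x y
    rw [pvSplit t _ (fun _ => List.replicate m x) (List.replicate m y)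
      (fun i hi => by rw [hbeq i hi]; simp) (by rw [hbt]; simp), pvFlatRep]
  rw [← hblk "Surface" "Outdoors", ← hblk "NoSun" "SunExposed", ← hblk "NoWind" "WindExposed"]
  simp only [Prod.mk.injEq, and_true, true_and]
  set F4 : Nat → List String := fun i =>
    List.map (fun (x : Nat) => "floor_" ++ PySem.Int.toStr ((x : Int) + 1) ++ "_" ++ PySem.Int.toStr ((i : Int) + 2))
      (List.range m) with hF4
  have hlenF4 : ∀ i, (F4 i).length = m := by intro i; rw [hF4]; simp
  conv_rhs => rw [pvSplit t _ F4 (List.replicate m "")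
      (fun i hi => by rw [hbeq i hi]; rw [hF4]; simp)
      (by rw [hbt]; simp [List.map_const', List.length_range])]
  rw [pvLenFlat (t + 1) m F4 hlenF4]
  have hsub : (t + 1) * m - m = t * m := by simp [Nat.succ_mul]
  rw [hsub, List.range_succ, List.flatMap_append,
    show t * m = ((List.range t).flatMap F4).length from (pvLenFlat t m F4 hlenF4).symm,
    List.take_left]

-- ===== VERDICT (by name: the statement is the Claim_ definition above) =====
theorem gen_RoofName_spec : Claim_equal_gen_RoofName := by
  intro roofs n_floor _ hpre
  unfold Spec_gen_RoofName
  exact gen_RoofName_eq roofs n_floor hpre
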